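-- pv_equiv track=rewrite | github.com/Glaedr304/2023AdventOfCode | 13/Part1.py | validateMirror
-- ===== SOURCE A (Python) =====
-- def validateMirror(arr, index, spacing) -> bool:
--     minIndex = 0
--     maxIndex = len(arr) - 1
--     if (index - 1) < minIndex or (index + spacing) > maxIndex:
--         return True
--     if "".join(arr[index - 1]) != "".join(arr[index + spacing]):
--         return False
--     return validateMirror(arr, index - 1, spacing + 2)
-- ===== SOURCE B (Python) =====
-- def validateMirror(arr, index, spacing) -> bool:
--     left = index - 1
--     right = index + spacing
--     while left >= 0 and right <= len(arr) - 1: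
--         if "".join(arr[left]) != "".join(arr[right]):
--             return False
--         left -= 1
--         right += 1
--     return True
-- ===== Notes on version B (the rewrite author's own statement) =====
-- stated objective: alternative
-- what changed: Replaces the recursion that threads (index, spacing) through self-calls with an explicit iterative while-loop maintaining two expanding pointers left/right.
import Mathlib
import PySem

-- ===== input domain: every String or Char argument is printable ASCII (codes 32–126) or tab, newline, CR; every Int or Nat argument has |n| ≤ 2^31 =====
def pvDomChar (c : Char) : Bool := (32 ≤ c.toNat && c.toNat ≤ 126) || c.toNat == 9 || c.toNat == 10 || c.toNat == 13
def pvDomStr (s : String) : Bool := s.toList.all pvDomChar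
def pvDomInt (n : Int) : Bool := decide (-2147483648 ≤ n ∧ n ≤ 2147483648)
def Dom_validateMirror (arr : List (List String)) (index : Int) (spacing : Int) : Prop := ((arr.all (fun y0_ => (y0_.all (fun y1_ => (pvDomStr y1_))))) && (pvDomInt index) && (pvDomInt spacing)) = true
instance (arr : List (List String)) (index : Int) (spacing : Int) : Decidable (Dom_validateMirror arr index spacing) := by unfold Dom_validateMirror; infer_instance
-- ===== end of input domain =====

-- B replaces A's recursion (threading index/spacing) by an explicit two-pointer while-loop; return value only, no mutation.

-- ===== PORT A =====
def validateMirror (arr : List (List String)) (index : Int) (spacing : Int) : Bool :=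
  let minIndex : Int := 0
  let maxIndex : Int := (arr.length : Int) - 1
  if (index - 1) < minIndex ∨ (index + spacing) > maxIndex then true
  else if PySem.Str.join "" ((PySem.List.pyGet? arr (index - 1)).getD [])
        ≠ PySem.Str.join "" ((PySem.List.pyGet? arr (index + spacing)).getD []) then false
  else validateMirror arr (index - 1) (spacing + 2)
termination_by index.toNat
decreasing_by omega

-- ===== PORT B =====
def mirrorLoop (arr : List (List String)) (left right : Int) : Bool :=
  if left ≥ 0 ∧ right ≤ (arr.length : Int) - 1 then
    if PySem.Str.join "" ((PySem.List.pyGet? arr left).getD [])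
        ≠ PySem.Str.join "" ((PySem.List.pyGet? arr right).getD []) then false
    else mirrorLoop arr (left - 1) (right + 1)
  else true
termination_by (left + 1).toNat
decreasing_by omega

def validateMirror_alt (arr : List (List String)) (index : Int) (spacing : Int) : Bool :=
  mirrorLoop arr (index - 1) (index + spacing)

-- ===== PRECONDITION & SPEC =====
-- Pre_ excludes exactly the inputs on which A raises IndexError (the guard checks only index-1 ≥ 0
-- and index+spacing ≤ len-1, so a first access with index-1 ≥ len or index+spacing < -len raises).
def Pre_validateMirror (arr : List (List String)) (index : Int) (spacing : Int) : Prop :=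
  ¬ (index - 1 ≥ 0 ∧ index + spacing ≤ (arr.length : Int) - 1 ∧
     (index - 1 ≥ (arr.length : Int) ∨ index + spacing < -(arr.length : Int)))
instance (arr : List (List String)) (index : Int) (spacing : Int) : Decidable (Pre_validateMirror arr index spacing) := by unfold Pre_validateMirror; infer_instance

def pvWitness_validateMirror : List (List String) × Int × Int := ([[ "a" ], [ "a" ]], 1, 0)

def Spec_validateMirror (arr : List (List String)) (index : Int) (spacing : Int) (out : Bool) : Prop := out = validateMirror_alt arr index spacing
instance (arr : List (List String)) (index : Int) (spacing : Int) (out : Bool) : Decidable (Spec_validateMirror arr index spacing out) := by unfold Spec_validateMirror; infer_instance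

-- ===== CLAIM (what is proved, stated in full; the proofs are below) =====
def Claim_equal_validateMirror : Prop := ∀ (arr : List (List String)) (index : Int) (spacing : Int), Dom_validateMirror arr index spacing → Pre_validateMirror arr index spacing → Spec_validateMirror arr index spacing (validateMirror arr index spacing)

-- ===== LEMMAS AND PROOFS =====

theorem validateMirror_eq_loop (arr : List (List String)) :
    ∀ (n : Nat) (index spacing : Int), index.toNat ≤ n →
      validateMirror arr index spacing = mirrorLoop arr (index - 1) (index + spacing) := by
  intro n
  induction n with
  | zero =>
    intro index spacing h
    rw [validateMirror, mirrorLoop]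
    have hA : index - 1 < 0 ∨ index + spacing > (arr.length : Int) - 1 := Or.inl (by omega)
    have hB : ¬(index - 1 ≥ 0 ∧ index + spacing ≤ (arr.length : Int) - 1) := by omega
    rw [if_pos hA, if_neg hB]
  | succ n ih =>
    intro index spacing h
    rw [validateMirror, mirrorLoop]
    by_cases hg : (index - 1) < 0 ∨ (index + spacing) > (arr.length : Int) - 1
    · have h2 : ¬(index - 1 ≥ 0 ∧ index + spacing ≤ (arr.length : Int) - 1) := by
        rcases hg with h | h <;> omega
      rw [if_pos hg, if_neg h2]
    · have h2 : index - 1 ≥ 0 ∧ index + spacing ≤ (arr.length : Int) - 1 := by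
        have := not_or.mp hg; omega
      rw [if_neg hg, if_pos h2]
      by_cases hj : PySem.Str.join "" ((PySem.List.pyGet? arr (index - 1)).getD [])
          ≠ PySem.Str.join "" ((PySem.List.pyGet? arr (index + spacing)).getD [])
      · rw [if_pos hj]; rw [if_pos hj]
      · rw [if_neg hj]; rw [if_neg hj]
        have h3 : index - 1 + (spacing + 2) = index + spacing + 1 := by ring
        have h4 : (index - 1).toNat ≤ n := by omega
        rw [ih (index - 1) (spacing + 2) h4, h3]

-- ===== VERDICT (by name: the statement is the Claim_ definition above) =====
theorem validateMirror_spec : Claim_equal_validateMirror := by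
  intro arr index spacing _ _
  unfold Spec_validateMirror validateMirror_alt
  exact validateMirror_eq_loop arr index.toNat index spacing le_rfl
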